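-- pv_equiv track=rewrite | github.com/EconForge/dyno.py | dev_higher_2.py | expand_symmetric_indices
-- ===== SOURCE A (Python) =====
-- import itertools
--
-- def expand_symmetric_indices(sparse_coo_dict):
--     """Expand canonical sparse COO dict to include all symmetric permutations.
--
--     Args:
--         sparse_coo_dict: dict with canonical indices as keys
--
--     Returns:
--         dict: expanded dict with all symmetric permutations
--     """
--     expanded = {}
--
--     for indices, value in sparse_coo_dict.items():
--         if len(indices) <= 2:  # Jacobian case - no symmetry to expand
--             expanded[indices] = value
--         else:
--             # Generate all unique permutations of variable indices (keeping equation index fixed)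
--             eq_idx = indices[0]
--             var_indices = indices[1:]
--
--             # Generate all permutations and add them
--             for perm in itertools.permutations(var_indices):
--                 full_idx = (eq_idx,) + perm
--                 expanded[full_idx] = value
--
--     return expanded
-- ===== SOURCE B (Python) =====
-- def _distinct_perms(xs):
--     """All distinct permutations of tuple/list xs, as tuples, in
--     first-occurrence order: at each level pick each value once, scanning
--     positions left to right and skipping values seen at an earlier position."""
--     if not xs:
--         return [()]
--     out = []
--     for i, x in enumerate(xs):
--         if x in xs[:i]:
--             continue
--         for rest in _distinct_perms(xs[:i] + xs[i + 1:]):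
--             out.append((x,) + rest)
--     return out
--
--
-- def expand_symmetric_indices(sparse_coo_dict):
--     """Expand canonical sparse COO dict to include all symmetric permutations.
--
--     Same result as the itertools version, but each distinct permutation of the
--     variable indices is generated exactly once, and the recursion runs only
--     once per repetition pattern: a key's variable indices are canonicalised to
--     'codes' (first-occurrence positions), the distinct permutations of the
--     codes are cached per code tuple, and each cached code permutation is
--     applied back to the key's actual values.
--     """
--     expanded = {}
--     pattern_cache = {}
--     for indices, value in sparse_coo_dict.items():
--         if len(indices) <= 2:
--             expanded[indices] = value
--         else:
--             head = indices[:1]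
--             var_indices = indices[1:]
--             codes = tuple(var_indices.index(x) for x in var_indices)
--             pats = pattern_cache.get(codes)
--             if pats is None:
--                 pats = _distinct_perms(codes)
--                 pattern_cache[codes] = pats
--             for pat in pats:
--                 expanded[head + tuple(var_indices[c] for c in pat)] = value
--     return expanded
-- ===== Notes on version B (the rewrite author's own statement) =====
-- stated objective: alternative
-- what changed: B generates each distinct multiset permutation of the variable indices exactly once (recursive generator skipping values already picked at a level), computes it only once per repetition pattern via a per-call pattern cache, and applies the cached code-permutations to each key's values, instead of A's enumeration of all n! positional permutations deduplicated through dict-key overwrite; on duplicate-free keys both still emit all n! permutations, so B is not measurably faster there.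
import Mathlib
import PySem

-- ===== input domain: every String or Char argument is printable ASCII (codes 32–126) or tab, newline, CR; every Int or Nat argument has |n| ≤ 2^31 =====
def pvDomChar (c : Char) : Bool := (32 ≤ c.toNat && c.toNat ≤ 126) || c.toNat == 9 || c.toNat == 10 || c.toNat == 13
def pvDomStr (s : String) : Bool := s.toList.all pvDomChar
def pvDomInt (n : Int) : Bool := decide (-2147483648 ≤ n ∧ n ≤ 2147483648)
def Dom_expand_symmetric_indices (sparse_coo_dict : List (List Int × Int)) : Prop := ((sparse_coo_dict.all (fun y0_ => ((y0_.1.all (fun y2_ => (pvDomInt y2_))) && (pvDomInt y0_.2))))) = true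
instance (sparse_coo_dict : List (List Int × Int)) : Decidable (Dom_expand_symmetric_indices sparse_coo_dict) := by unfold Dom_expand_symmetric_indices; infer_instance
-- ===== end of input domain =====

-- B generates each distinct multiset permutation of the variable indices exactly
-- once (recursion skipping values already picked at a level), computed once per
-- repetition pattern of a key and cached, instead of A's full n! positional
-- permutations deduplicated by dict overwrite; objective: alternative algorithm.

-- ===== PORT A =====
def expand_symmetric_indices (sparse_coo_dict : List (List Int × Int)) : List (List Int × Int) :=
  (sparse_coo_dict.foldl
    (fun (expanded : PySem.Dict (List Int) Int) kv =>
      if kv.1.length ≤ 2 then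
        expanded.insert kv.1 kv.2
      else
        match kv.1 with
        | [] => expanded   -- unreachable: length > 2
        | eq_idx :: var_indices =>
          (PySem.List.permutations var_indices var_indices.length).foldl
            (fun e perm => e.insert (eq_idx :: perm) kv.2) expanded)
    PySem.Dict.empty).items

-- ===== PORT B =====
-- _distinct_perms from Source B: at each level pick each value once, scanning positions
-- left to right and skipping a value already present among the earlier positions.
-- The recursion is on the list's length, written with the length as structural fuel.
def distinctPermsAux : Nat → List Int → List (List Int)
  | _, [] => [[]]
  | 0, _ :: _ => []   -- never reached: fuel = length
  | n + 1, xs => (List.range xs.length).flatMap (fun i =>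
      match xs[i]? with
      | none => []
      | some x =>
        if x ∈ xs.take i then []
        else (distinctPermsAux n (xs.eraseIdx i)).map (fun rest => x :: rest))

def distinctPerms (xs : List Int) : List (List Int) := distinctPermsAux xs.length xs

def expand_symmetric_indices_alt (sparse_coo_dict : List (List Int × Int)) : List (List Int × Int) :=
  (sparse_coo_dict.foldl
    (fun (st : PySem.Dict (List Int) Int × PySem.Dict (List Int) (List (List Int))) kv =>
      if kv.1.length ≤ 2 then
        (st.1.insert kv.1 kv.2, st.2)
      else
        match kv.1 with
        | [] => st   -- unreachable: length > 2
        | eq_idx :: var_indices =>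
          -- codes = tuple(var_indices.index(x) for x in var_indices); .index always
          -- succeeds here (x ∈ var_indices), so the getD 0 default is never taken
          let codes : List Int :=
            var_indices.map (fun x => (((PySem.List.index? var_indices x).getD 0 : Nat) : Int))
          match st.2.get? codes with
          | some pats =>
            (pats.foldl (fun e pat =>
                e.insert (eq_idx :: pat.map (fun c => (PySem.List.pyGet? var_indices c).getD 0)) kv.2)
              st.1, st.2)
          | none =>
            -- every code is a valid index into var_indices, so pyGet? always returns
            let pats := distinctPerms codes
            (pats.foldl (fun e pat =>
                e.insert (eq_idx :: pat.map (fun c => (PySem.List.pyGet? var_indices c).getD 0)) kv.2)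
              st.1, st.2.insert codes pats))
    (PySem.Dict.empty, PySem.Dict.empty)).1.items

-- ===== PRECONDITION & SPEC =====
def Spec_expand_symmetric_indices (sparse_coo_dict : List (List Int × Int)) (out : List (List Int × Int)) : Prop := out = expand_symmetric_indices_alt sparse_coo_dict
instance (sparse_coo_dict : List (List Int × Int)) (out : List (List Int × Int)) : Decidable (Spec_expand_symmetric_indices sparse_coo_dict out) := by unfold Spec_expand_symmetric_indices; infer_instance

-- ===== CLAIM (what is proved, stated in full; the proofs are below) =====
def Claim_equal_expand_symmetric_indices : Prop := ∀ (sparse_coo_dict : List (List Int × Int)), Dom_expand_symmetric_indices sparse_coo_dict → Spec_expand_symmetric_indices sparse_coo_dict (expand_symmetric_indices sparse_coo_dict)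

-- ===== LEMMAS AND PROOFS =====

-- Inserting a key that is already bound to the same value leaves the dict unchanged.
theorem pvInsertAbsorb (d : PySem.Dict (List Int) Int) (k : List Int) (v : Int)
    (hnd : d.keys.Nodup) (h : d.get? k = some v) : d.insert k v = d := by
  apply PySem.Dict.ext
  have hc : d.contains k = true := by
    rw [PySem.Dict.contains_eq_isSome_get?, h]; rfl
  rw [PySem.Dict.items_insert_of_contains d v hc]
  have hid : ∀ p ∈ d.items, (if (p.1 == k) = true then (k, v) else p) = p := by
    intro p hp
    by_cases hk : p.1 = k
    · have hg := PySem.Dict.get?_of_mem_items d (k := p.1) (v := p.2) (by simpa using hp) hnd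
      rw [hk, h] at hg
      have hv : v = p.2 := Option.some_inj.mp hg
      obtain ⟨p1, p2⟩ := p
      simp only at hk hv
      simp [hk, hv]
    · simp [hk]
  calc List.map (fun p => if (p.1 == k) = true then (k, v) else p) d.items
      = List.map id d.items := List.map_congr_left (by simpa using hid)
    _ = d.items := List.map_id d.items

-- first-occurrence dedup with an explicit "seen" accumulator
def pvDedup (seen : List (List Int)) : List (List Int) → List (List Int)
  | [] => []
  | y :: t => if y ∈ seen then pvDedup seen t else y :: pvDedup (y :: seen) t

theorem pvDedup_congr : ∀ (L s s' : List (List Int)),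
    (∀ y ∈ L, (y ∈ s ↔ y ∈ s')) → pvDedup s L = pvDedup s' L := by
  intro L
  induction L with
  | nil => intro s s' _; rfl
  | cons y t ih =>
    intro s s' h
    simp only [pvDedup]
    have hy := h y (by simp)
    by_cases hys : y ∈ s
    · rw [if_pos hys, if_pos (hy.mp hys)]
      exact ih s s' (fun z hz => h z (by simp [hz]))
    · rw [if_neg hys, if_neg (fun c => hys (hy.mpr c))]
      congr 1
      exact ih (y :: s) (y :: s') (fun z hz => by
        simp only [List.mem_cons]
        exact or_congr Iff.rfl (h z (by simp [hz])))

theorem pvDedup_all_mem : ∀ (L s : List (List Int)), (∀ y ∈ L, y ∈ s) → pvDedup s L = [] := by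
  intro L
  induction L with
  | nil => intro s _; rfl
  | cons y t ih =>
    intro s h
    simp only [pvDedup, if_pos (h y (by simp))]
    exact ih s (fun z hz => h z (by simp [hz]))

def pvSeen (s : List (List Int)) (L : List (List Int)) : List (List Int) :=
  L.foldl (fun s y => if y ∈ s then s else y :: s) s

theorem pvMem_seen : ∀ (L s : List (List Int)) (y : List Int),
    y ∈ pvSeen s L ↔ y ∈ s ∨ y ∈ L := by
  intro L
  induction L with
  | nil => intro s y; simp [pvSeen]
  | cons z t ih =>
    intro s y
    simp only [pvSeen, List.foldl_cons]
    by_cases hz : z ∈ s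
    · rw [if_pos hz,
        show List.foldl (fun s y => if y ∈ s then s else y :: s) s t = pvSeen s t from rfl,
        ih, List.mem_cons]
      constructor
      · rintro (h | h)
        · exact Or.inl h
        · exact Or.inr (Or.inr h)
      · rintro (h | rfl | h)
        · exact Or.inl h
        · exact Or.inl hz
        · exact Or.inr h
    · rw [if_neg hz,
        show List.foldl (fun s y => if y ∈ s then s else y :: s) (z :: s) t = pvSeen (z :: s) t from rfl,
        ih, List.mem_cons, List.mem_cons]
      tauto

theorem pvDedup_append : ∀ (L1 L2 s : List (List Int)),
    pvDedup s (L1 ++ L2) = pvDedup s L1 ++ pvDedup (pvSeen s L1) L2 := by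
  intro L1
  induction L1 with
  | nil => intro L2 s; simp [pvDedup, pvSeen]
  | cons y t ih =>
    intro L2 s
    rw [List.cons_append]
    simp only [pvDedup]
    by_cases hy : y ∈ s
    · rw [if_pos hy, if_pos hy,
        show pvSeen s (y :: t) = pvSeen s t by simp [pvSeen, hy]]
      exact ih L2 s
    · rw [if_neg hy, if_neg hy, List.cons_append,
        show pvSeen s (y :: t) = pvSeen (y :: s) t by simp [pvSeen, hy]]
      congr 1
      exact ih L2 (y :: s)

theorem pvDedup_map_cons (x : Int) : ∀ (L s : List (List Int)),
    pvDedup (s.map (fun t => x :: t)) (L.map (fun t => x :: t))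
      = (pvDedup s L).map (fun t => x :: t) := by
  intro L
  induction L with
  | nil => intro s; rfl
  | cons y t ih =>
    intro s
    simp only [List.map_cons, pvDedup]
    have hmem : (x :: y ∈ s.map (fun t => x :: t)) ↔ y ∈ s := by simp
    by_cases hy : y ∈ s
    · rw [if_pos (hmem.mpr hy), if_pos hy]; exact ih s
    · rw [if_neg (fun c => hy (hmem.mp c)), if_neg hy, List.map_cons]
      congr 1
      exact (show pvDedup ((y :: s).map (fun t => x :: t)) (t.map (fun t => x :: t)) = _ from ih (y :: s))

-- the position-i blocks of the two recursions
def pvBlockA (ys : List Int) (m i : Nat) : List (List Int) :=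
  match ys[i]? with
  | none => []
  | some x => (PySem.List.permutations (ys.eraseIdx i) m).map (fun p => x :: p)

def pvBlockB (ys : List Int) (m i : Nat) : List (List Int) :=
  match ys[i]? with
  | none => []
  | some x =>
    if x ∈ ys.take i then []
    else (distinctPermsAux m (ys.eraseIdx i)).map (fun rest => x :: rest)

theorem pvBlockA_eq (ys : List Int) (m i : Nat) (x : Int) (h : ys[i]? = some x) :
    pvBlockA ys m i = (PySem.List.permutations (ys.eraseIdx i) m).map (fun p => x :: p) := by
  simp [pvBlockA, h]

theorem pvBlockB_eq (ys : List Int) (m i : Nat) (x : Int) (h : ys[i]? = some x) :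
    pvBlockB ys m i = (if x ∈ ys.take i then []
      else (distinctPermsAux m (ys.eraseIdx i)).map (fun rest => x :: rest)) := by
  simp [pvBlockB, h]

theorem pvPermutations_succ (xs : List Int) (m : Nat) :
    PySem.List.permutations xs (m + 1) = (List.range xs.length).flatMap (pvBlockA xs m) := by
  rw [PySem.List.permutations]
  congr 1
  funext i
  cases hxi : xs[i]? <;> simp [pvBlockA, hxi]

theorem pvDistinctAux_succ (x0 : Int) (xs0 : List Int) (m : Nat) :
    distinctPermsAux (m + 1) (x0 :: xs0)
      = (List.range (x0 :: xs0).length).flatMap (pvBlockB (x0 :: xs0) m) := by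
  rw [distinctPermsAux]
  case x_2 => intro h; simp at h
  congr 1

-- converse of perm_of_mem_permutations
theorem pvMem_permutations_of_perm : ∀ (n : Nat) (xs p : List Int), xs.length = n →
    p.Perm xs → p ∈ PySem.List.permutations xs xs.length := by
  intro n
  induction n with
  | zero =>
    intro xs p hlen hp
    have hxs : xs = [] := List.eq_nil_of_length_eq_zero hlen
    subst hxs
    have hp0 : p = [] := List.Perm.eq_nil hp
    simp [hp0]
  | succ m ih =>
    intro xs p hlen hp
    match p with
    | [] =>
      have : xs = [] := List.Perm.eq_nil hp.symm
      rw [this] at hlen; simp at hlen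
    | a :: t =>
      have ha : a ∈ xs ∧ t.Perm (xs.erase a) := List.cons_perm_iff_perm_erase.mp hp
      have hk : xs.idxOf a < xs.length := List.idxOf_lt_length_of_mem ha.1
      have hxa : xs[xs.idxOf a] = a := List.getElem_idxOf hk
      rw [hlen, pvPermutations_succ]
      rw [List.mem_flatMap]
      refine ⟨xs.idxOf a, by simpa [List.mem_range] using hk, ?_⟩
      have hget : xs[xs.idxOf a]? = some a := by
        rw [List.getElem?_eq_getElem hk, hxa]
      rw [pvBlockA_eq xs m _ a hget]
      simp only [List.mem_map]
      refine ⟨t, ?_, rfl⟩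
      have hlen' : (xs.eraseIdx (xs.idxOf a)).length = m := by
        rw [List.length_eraseIdx_of_lt hk]; omega
      have hperm : t.Perm (xs.eraseIdx (xs.idxOf a)) := by
        have h1 : (xs.eraseIdx (xs.idxOf a)).Perm (xs.erase a) := by
          have h2 : (a :: xs.eraseIdx (xs.idxOf a)).Perm xs := by
            have := List.getElem_cons_eraseIdx_perm hk
            rwa [hxa] at this
          have h3 : xs.Perm (a :: xs.erase a) := List.perm_cons_erase ha.1
          exact (List.perm_cons a).mp (h2.trans h3)
        exact ha.2.trans h1.symm
      have hmem := ih (xs.eraseIdx (xs.idxOf a)) t hlen' hperm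
      rwa [hlen'] at hmem

theorem pvPerm_of_mem_permutations' {xs p : List Int} {m : Nat} (hlen : xs.length = m)
    (h : p ∈ PySem.List.permutations xs m) : p.Perm xs := by
  subst hlen; exact PySem.List.perm_of_mem_permutations h

-- main combinatorial fact: first-occurrence dedup of the n! permutation list
-- is exactly B's distinct-permutation list
theorem pvDedup_permutations : ∀ (n : Nat) (xs : List Int), xs.length = n →
    pvDedup [] (PySem.List.permutations xs xs.length) = distinctPerms xs := by
  intro n
  induction n using Nat.strong_induction_on with
  | _ n ih =>
  intro xs hlen
  match hxs : xs, n with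
  | [], _ => decide
  | (x0 :: xs0), 0 => simp at hlen
  | (x0 :: xs0), (m + 1) =>
    have hlen' : (x0 :: xs0).length = m + 1 := hlen
    have hMAIN : ∀ (cnt k : Nat) (s : List (List Int)), k + cnt = m + 1 →
        (∀ y, y ∈ s ↔ ∃ v ∈ (x0 :: xs0).take k, ∃ t, y = v :: t ∧ t.Perm ((x0 :: xs0).erase v)) →
        pvDedup s ((List.range' k cnt).flatMap (pvBlockA (x0 :: xs0) m))
          = (List.range' k cnt).flatMap (pvBlockB (x0 :: xs0) m) := by
      intro cnt
      induction cnt with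
      | zero => intro k s _ _; simp [pvDedup]
      | succ c ihc =>
        intro k s hkc hs
        have hk : k < (x0 :: xs0).length := by rw [hlen']; omega
        have hget : (x0 :: xs0)[k]? = some (x0 :: xs0)[k] := List.getElem?_eq_getElem hk
        have hlenE : ((x0 :: xs0).eraseIdx k).length = m := by
          rw [List.length_eraseIdx_of_lt hk, hlen']
          omega

        have herase : ((x0 :: xs0).eraseIdx k).Perm ((x0 :: xs0).erase (x0 :: xs0)[k]) := by
          have h2 : ((x0 :: xs0)[k] :: (x0 :: xs0).eraseIdx k).Perm (x0 :: xs0) :=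
            List.getElem_cons_eraseIdx_perm hk
          have h3 : (x0 :: xs0).Perm ((x0 :: xs0)[k] :: (x0 :: xs0).erase (x0 :: xs0)[k]) :=
            List.perm_cons_erase (List.getElem_mem hk)
          exact (List.perm_cons (x0 :: xs0)[k]).mp (h2.trans h3)
        have hblockmem : ∀ y, y ∈ pvBlockA (x0 :: xs0) m k
            ↔ ∃ t, y = (x0 :: xs0)[k] :: t ∧ t.Perm ((x0 :: xs0).erase (x0 :: xs0)[k]) := by
          intro y
          rw [pvBlockA_eq _ m k _ hget]
          constructor
          · intro hy
            rcases List.mem_map.mp hy with ⟨p, hp, rfl⟩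
            exact ⟨p, rfl, (pvPerm_of_mem_permutations' hlenE hp).trans herase⟩
          · rintro ⟨t, rfl, ht⟩
            refine List.mem_map.mpr ⟨t, ?_, rfl⟩
            have hm := pvMem_permutations_of_perm m ((x0 :: xs0).eraseIdx k) t hlenE
              (ht.trans herase.symm)
            rwa [hlenE] at hm
        have htake : (x0 :: xs0).take (k + 1) = (x0 :: xs0).take k ++ [(x0 :: xs0)[k]] := by
          rw [List.take_add_one, List.getElem?_eq_getElem hk]; rfl
        have hseen : ∀ y, y ∈ pvSeen s (pvBlockA (x0 :: xs0) m k)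
            ↔ ∃ v ∈ (x0 :: xs0).take (k + 1), ∃ t, y = v :: t ∧ t.Perm ((x0 :: xs0).erase v) := by
          intro y
          rw [pvMem_seen, hs y, hblockmem y, htake]
          constructor
          · rintro (⟨v, hv, t, rfl, ht⟩ | ⟨t, rfl, ht⟩)
            · exact ⟨v, List.mem_append.mpr (Or.inl hv), t, rfl, ht⟩
            · exact ⟨(x0 :: xs0)[k], List.mem_append.mpr (Or.inr (by simp)), t, rfl, ht⟩
          · rintro ⟨v, hv, t, rfl, ht⟩
            rcases List.mem_append.mp hv with hv | hv
            · exact Or.inl ⟨v, hv, t, rfl, ht⟩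
            · simp only [List.mem_singleton] at hv
              exact Or.inr ⟨t, by rw [hv], by rw [hv] at ht; exact ht⟩
        rw [List.range'_succ, List.flatMap_cons, List.flatMap_cons, pvDedup_append,
          ihc (k + 1) _ (by omega) hseen]
        congr 1
        rw [pvBlockB_eq _ m k _ hget]
        by_cases hfresh : (x0 :: xs0)[k] ∈ (x0 :: xs0).take k
        · rw [if_pos hfresh]
          apply pvDedup_all_mem
          intro y hy
          rcases (hblockmem y).mp hy with ⟨t, rfl, ht⟩
          exact (hs _).mpr ⟨(x0 :: xs0)[k], hfresh, t, rfl, ht⟩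
        · rw [if_neg hfresh]
          have hdisj : ∀ y ∈ pvBlockA (x0 :: xs0) m k, (y ∈ s ↔ y ∈ ([] : List (List Int))) := by
            intro y hy
            rcases (hblockmem y).mp hy with ⟨t, rfl, _⟩
            simp only [List.mem_nil_iff, iff_false]
            intro hc
            rcases (hs _).mp hc with ⟨v, hv, t', heq, _⟩
            simp only [List.cons.injEq] at heq
            exact hfresh (heq.1 ▸ hv)
          rw [pvDedup_congr _ s [] hdisj, pvBlockA_eq _ m k _ hget]
          have hmap := pvDedup_map_cons (x0 :: xs0)[k] (PySem.List.permutations ((x0 :: xs0).eraseIdx k) m) []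
          simp only [List.map_nil] at hmap
          rw [hmap]
          congr 1
          have hrec := ih m (by omega) ((x0 :: xs0).eraseIdx k) hlenE
          rw [hlenE] at hrec
          rw [hrec, show distinctPerms ((x0 :: xs0).eraseIdx k)
            = distinctPermsAux ((x0 :: xs0).eraseIdx k).length ((x0 :: xs0).eraseIdx k) from rfl, hlenE]
    have h0 := hMAIN (m + 1) 0 [] (by omega) (by intro y; simp)
    have e1 : PySem.List.permutations (x0 :: xs0) (x0 :: xs0).length
        = (List.range' 0 (m + 1)).flatMap (pvBlockA (x0 :: xs0) m) := by
      rw [hlen', pvPermutations_succ, hlen', List.range_eq_range']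
    have e2 : distinctPerms (x0 :: xs0) = (List.range' 0 (m + 1)).flatMap (pvBlockB (x0 :: xs0) m) := by
      rw [show distinctPerms (x0 :: xs0) = distinctPermsAux (x0 :: xs0).length (x0 :: xs0) from rfl,
        hlen', pvDistinctAux_succ, hlen', List.range_eq_range']
    rw [e1, e2]
    exact h0

-- folding same-value inserts over a key list only depends on the deduped key list
theorem pvFoldl_insert_dedup (v : Int) : ∀ (L : List (List Int)) (d : PySem.Dict (List Int) Int)
    (s : List (List Int)), d.keys.Nodup → (∀ k ∈ s, d.get? k = some v) →
    L.foldl (fun e k => e.insert k v) d = (pvDedup s L).foldl (fun e k => e.insert k v) d := by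
  intro L
  induction L with
  | nil => intro d s _ _; rfl
  | cons y t ih =>
    intro d s hnd hsv
    simp only [List.foldl_cons, pvDedup]
    by_cases hy : y ∈ s
    · rw [if_pos hy, pvInsertAbsorb d y v hnd (hsv y hy)]
      exact ih d s hnd hsv
    · rw [if_neg hy]
      simp only [List.foldl_cons]
      refine ih (d.insert y v) (y :: s) (PySem.Dict.nodup_keys_insert d y v hnd) ?_
      intro k hk
      rcases List.mem_cons.mp hk with rfl | hk
      · exact PySem.Dict.get?_insert_self d k v
      · by_cases hky : k = y
        · rw [hky]; exact PySem.Dict.get?_insert_self d y v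
        · rw [PySem.Dict.get?_insert_of_ne d v hky]; exact hsv k hk

-- per-entry agreement of the two inner loops
theorem pvEntry_eq (eq_idx : Int) (vars : List Int) (v : Int) (d : PySem.Dict (List Int) Int)
    (hnd : d.keys.Nodup) :
    (PySem.List.permutations vars vars.length).foldl (fun e p => e.insert (eq_idx :: p) v) d
      = (distinctPerms vars).foldl (fun e p => e.insert (eq_idx :: p) v) d := by
  have hA : (PySem.List.permutations vars vars.length).foldl (fun e p => e.insert (eq_idx :: p) v) d
      = ((PySem.List.permutations vars vars.length).map (fun p => eq_idx :: p)).foldl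
          (fun e k => e.insert k v) d := by
    rw [List.foldl_map]
  have hB : (distinctPerms vars).foldl (fun e p => e.insert (eq_idx :: p) v) d
      = ((distinctPerms vars).map (fun p => eq_idx :: p)).foldl (fun e k => e.insert k v) d := by
    rw [List.foldl_map]
  rw [hA, hB]
  rw [pvFoldl_insert_dedup v _ d [] hnd (by simp)]
  congr 1
  have hmap := pvDedup_map_cons eq_idx (PySem.List.permutations vars vars.length) []
  simp only [List.map_nil] at hmap
  rw [hmap, pvDedup_permutations vars.length vars rfl]

-- the two loop bodies, named
def pvStepA (expanded : PySem.Dict (List Int) Int) (kv : List Int × Int) : PySem.Dict (List Int) Int :=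
  if kv.1.length ≤ 2 then expanded.insert kv.1 kv.2
  else
    match kv.1 with
    | [] => expanded
    | eq_idx :: var_indices =>
      (PySem.List.permutations var_indices var_indices.length).foldl
        (fun e perm => e.insert (eq_idx :: perm) kv.2) expanded

def pvStepB (expanded : PySem.Dict (List Int) Int) (kv : List Int × Int) : PySem.Dict (List Int) Int :=
  if kv.1.length ≤ 2 then expanded.insert kv.1 kv.2
  else
    match kv.1 with
    | [] => expanded
    | eq_idx :: var_indices =>
      (distinctPerms var_indices).foldl
        (fun e perm => e.insert (eq_idx :: perm) kv.2) expanded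

theorem pvStep_eq (d : PySem.Dict (List Int) Int) (kv : List Int × Int)
    (hnd : d.keys.Nodup) : pvStepA d kv = pvStepB d kv := by
  obtain ⟨k1, v1⟩ := kv
  unfold pvStepA pvStepB
  by_cases hle : k1.length ≤ 2
  · simp [hle]
  · rw [if_neg hle, if_neg hle]
    cases k1 with
    | nil => rfl
    | cons eq_idx var_indices => exact pvEntry_eq eq_idx var_indices v1 d hnd

theorem pvStepA_nodup (d : PySem.Dict (List Int) Int) (kv : List Int × Int)
    (hnd : d.keys.Nodup) : (pvStepA d kv).keys.Nodup := by
  obtain ⟨k1, v1⟩ := kv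
  unfold pvStepA
  by_cases hle : k1.length ≤ 2
  · rw [if_pos hle]; exact PySem.Dict.nodup_keys_insert d k1 v1 hnd
  · rw [if_neg hle]
    cases k1 with
    | nil => exact hnd
    | cons eq_idx var_indices =>
      exact PySem.Dict.nodup_keys_foldl_insert_key
        (PySem.List.permutations var_indices var_indices.length)
        (fun p => eq_idx :: p) (fun _ _ => v1) d hnd

-- whole-fold agreement, with the Nodup-keys invariant
theorem pvFold_eq : ∀ (l : List (List Int × Int)) (d : PySem.Dict (List Int) Int),
    d.keys.Nodup → l.foldl pvStepA d = l.foldl pvStepB d := by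
  intro l
  induction l with
  | nil => intro d _; rfl
  | cons kv t ih =>
    intro d hnd
    rw [List.foldl_cons, List.foldl_cons, ← pvStep_eq d kv hnd]
    exact ih _ (pvStepA_nodup d kv hnd)

theorem pvPortA_eq (l : List (List Int × Int)) :
    expand_symmetric_indices l = (l.foldl pvStepA PySem.Dict.empty).items := rfl

-- B-side proof decomposition: codes, value lookup, pattern application
def pvG (vars : List Int) (c : Int) : Int := (PySem.List.pyGet? vars c).getD 0

def pvCodes (vars : List Int) : List Int :=
  vars.map (fun x => (((PySem.List.index? vars x).getD 0 : Nat) : Int))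

def pvStepC (st : PySem.Dict (List Int) Int × PySem.Dict (List Int) (List (List Int)))
    (kv : List Int × Int) : PySem.Dict (List Int) Int × PySem.Dict (List Int) (List (List Int)) :=
  if kv.1.length ≤ 2 then
    (st.1.insert kv.1 kv.2, st.2)
  else
    match kv.1 with
    | [] => st
    | eq_idx :: var_indices =>
      match st.2.get? (pvCodes var_indices) with
      | some pats =>
        (pats.foldl (fun e pat => e.insert (eq_idx :: pat.map (pvG var_indices)) kv.2) st.1, st.2)
      | none =>
        ((distinctPerms (pvCodes var_indices)).foldl
            (fun e pat => e.insert (eq_idx :: pat.map (pvG var_indices)) kv.2) st.1,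
         st.2.insert (pvCodes var_indices) (distinctPerms (pvCodes var_indices)))

def pvStepD (expanded : PySem.Dict (List Int) Int) (kv : List Int × Int) :
    PySem.Dict (List Int) Int :=
  if kv.1.length ≤ 2 then expanded.insert kv.1 kv.2
  else
    match kv.1 with
    | [] => expanded
    | eq_idx :: var_indices =>
      (distinctPerms (pvCodes var_indices)).foldl
        (fun e pat => e.insert (eq_idx :: pat.map (pvG var_indices)) kv.2) expanded

theorem pvPortB_eq (l : List (List Int × Int)) :
    expand_symmetric_indices_alt l
      = ((l.foldl pvStepC (PySem.Dict.empty, PySem.Dict.empty)).1).items := rfl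

theorem pvIndex?_of_mem (l : List Int) (x : Int) (h : x ∈ l) :
    PySem.List.index? l x = some (l.idxOf x) := by
  show List.idxOf? x l = some (l.idxOf x)
  induction l with
  | nil => cases h
  | cons y t ih =>
    by_cases hy : y = x
    · subst hy
      simp [List.idxOf?_cons]
    · have hx : x ∈ t := by
        rcases List.mem_cons.mp h with h' | h'
        · exact absurd h'.symm hy
        · exact h'
      have hbe : (y == x) = false := beq_eq_false_iff_ne.mpr hy
      simp [List.idxOf?_cons, List.idxOf_cons, hbe, ih hx]

theorem pvG_idxOf (vars : List Int) (x : Int) (h : x ∈ vars) :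
    pvG vars ((vars.idxOf x : Nat) : Int) = x := by
  have hlt : vars.idxOf x < vars.length := List.idxOf_lt_length_of_mem h
  show (PySem.List.pyGet? vars ((vars.idxOf x : Nat) : Int)).getD 0 = x
  rw [PySem.List.pyGet?_natCast, List.getElem?_eq_getElem hlt, List.getElem_idxOf hlt]
  rfl

theorem pvCodes_map_g (vars : List Int) : (pvCodes vars).map (pvG vars) = vars := by
  apply List.ext_getElem
  · simp [pvCodes]
  · intro i h1 h2
    have hi : i < vars.length := by simpa [pvCodes] using h2
    have hmem : vars[i] ∈ vars := List.getElem_mem hi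
    simp only [pvCodes, List.getElem_map]
    rw [pvIndex?_of_mem vars vars[i] hmem]
    exact pvG_idxOf vars vars[i] hmem

theorem pvCodes_inj (vars : List Int) :
    ∀ a ∈ pvCodes vars, ∀ b ∈ pvCodes vars, pvG vars a = pvG vars b → a = b := by
  intro a ha b hb hab
  rcases List.mem_map.mp ha with ⟨x, hx, rfl⟩
  rcases List.mem_map.mp hb with ⟨y, hy, rfl⟩
  rw [pvIndex?_of_mem vars x hx, pvIndex?_of_mem vars y hy] at hab ⊢
  simp only [Option.getD_some] at hab ⊢
  rw [pvG_idxOf vars x hx, pvG_idxOf vars y hy] at hab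
  subst hab
  rfl

-- relabelling: distinct permutations commute with a map injective on the elements
theorem pvRelabel : ∀ (n : Nat) (xs : List Int) (g : Int → Int),
    (∀ a ∈ xs, ∀ b ∈ xs, g a = g b → a = b) →
    distinctPermsAux n (xs.map g) = (distinctPermsAux n xs).map (List.map g) := by
  intro n
  induction n with
  | zero =>
    intro xs g _
    cases xs <;> rfl
  | succ m ih =>
    intro xs g hinj
    cases xs with
    | nil => rfl
    | cons x0 t =>
      rw [List.map_cons, pvDistinctAux_succ, pvDistinctAux_succ, List.map_flatMap]
      rw [show (g x0 :: t.map g).length = (x0 :: t).length by simp]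
      apply List.flatMap_congr
      intro i hi
      have hiL : i < (x0 :: t).length := List.mem_range.mp hi
      have hget : (x0 :: t)[i]? = some (x0 :: t)[i] := List.getElem?_eq_getElem hiL
      have hgetm : (g x0 :: t.map g)[i]? = some (g (x0 :: t)[i]) := by
        rw [show (g x0 :: t.map g) = (x0 :: t).map g from by simp, List.getElem?_map, hget]
        rfl
      rw [pvBlockB_eq _ m i _ hgetm, pvBlockB_eq _ m i _ hget]
      have htake : (g x0 :: t.map g).take i = ((x0 :: t).take i).map g := by
        rw [show (g x0 :: t.map g) = (x0 :: t).map g from by simp, List.map_take]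
      have hmemiff : (g (x0 :: t)[i] ∈ (g x0 :: t.map g).take i) ↔ ((x0 :: t)[i] ∈ (x0 :: t).take i) := by
        rw [htake]
        constructor
        · intro hm
          rcases List.mem_map.mp hm with ⟨w, hw, hgw⟩
          have hw' : w ∈ x0 :: t := List.take_subset i (x0 :: t) hw
          have := hinj w hw' (x0 :: t)[i] (List.getElem_mem hiL) hgw
          rwa [this] at hw
        · intro hm
          exact List.mem_map_of_mem hm
      by_cases hmem : (x0 :: t)[i] ∈ (x0 :: t).take i
      · rw [if_pos hmem, if_pos (hmemiff.mpr hmem)]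
        rfl
      · rw [if_neg hmem, if_neg (fun c => hmem (hmemiff.mp c))]
        have herderase : (g x0 :: t.map g).eraseIdx i = ((x0 :: t).eraseIdx i).map g := by
          rw [show (g x0 :: t.map g) = (x0 :: t).map g from by simp, List.eraseIdx_map]
        rw [herderase, ih ((x0 :: t).eraseIdx i) g
          (fun a ha b hb => hinj a ((List.eraseIdx_sublist (x0 :: t) i).subset ha)
            b ((List.eraseIdx_sublist (x0 :: t) i).subset hb))]
        simp [List.map_map, Function.comp_def]

theorem pvStepD_eq_B (expanded : PySem.Dict (List Int) Int) (kv : List Int × Int) :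
    pvStepD expanded kv = pvStepB expanded kv := by
  obtain ⟨k1, v1⟩ := kv
  unfold pvStepD pvStepB
  by_cases hle : k1.length ≤ 2
  · simp [hle]
  · rw [if_neg hle, if_neg hle]
    cases k1 with
    | nil => rfl
    | cons eq_idx var_indices =>
      show (distinctPerms (pvCodes var_indices)).foldl
          (fun e pat => e.insert (eq_idx :: pat.map (pvG var_indices)) v1) expanded
        = (distinctPerms var_indices).foldl (fun e p => e.insert (eq_idx :: p) v1) expanded
      have hmapped : (distinctPerms (pvCodes var_indices)).map (List.map (pvG var_indices))
          = distinctPerms var_indices := by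
        have hlen : (pvCodes var_indices).length = var_indices.length := by simp [pvCodes]
        show (distinctPermsAux (pvCodes var_indices).length (pvCodes var_indices)).map
            (List.map (pvG var_indices)) = distinctPerms var_indices
        rw [hlen, ← pvRelabel var_indices.length (pvCodes var_indices) (pvG var_indices)
          (pvCodes_inj var_indices), pvCodes_map_g]
        rfl
      calc (distinctPerms (pvCodes var_indices)).foldl
            (fun e pat => e.insert (eq_idx :: pat.map (pvG var_indices)) v1) expanded
          = ((distinctPerms (pvCodes var_indices)).map (List.map (pvG var_indices))).foldl
              (fun e p => e.insert (eq_idx :: p) v1) expanded := by rw [List.foldl_map]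
        _ = (distinctPerms var_indices).foldl (fun e p => e.insert (eq_idx :: p) v1) expanded := by
              rw [hmapped]

def pvCacheInv (cache : PySem.Dict (List Int) (List (List Int))) : Prop :=
  ∀ sig ps, cache.get? sig = some ps → ps = distinctPerms sig

theorem pvStepC_fst (st : PySem.Dict (List Int) Int × PySem.Dict (List Int) (List (List Int)))
    (kv : List Int × Int) (hinv : pvCacheInv st.2) : (pvStepC st kv).1 = pvStepD st.1 kv := by
  obtain ⟨exp, cache⟩ := st
  obtain ⟨k1, v1⟩ := kv
  by_cases hle : k1.length ≤ 2
  · simp [pvStepC, pvStepD, hle]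
  · cases k1 with
    | nil => simp [pvStepC, pvStepD]
    | cons eq_idx var_indices =>
      simp only [pvStepC, pvStepD]
      rw [if_neg hle, if_neg hle]
      cases hc : cache.get? (pvCodes var_indices) with
      | none => simp
      | some pats =>
        have hps := hinv (pvCodes var_indices) pats hc
        simp [hps]

theorem pvStepC_snd_inv (st : PySem.Dict (List Int) Int × PySem.Dict (List Int) (List (List Int)))
    (kv : List Int × Int) (hinv : pvCacheInv st.2) : pvCacheInv (pvStepC st kv).2 := by
  obtain ⟨exp, cache⟩ := st
  obtain ⟨k1, v1⟩ := kv
  by_cases hle : k1.length ≤ 2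
  · simpa [pvStepC, hle] using hinv
  · cases k1 with
    | nil => simpa [pvStepC, hle] using hinv
    | cons eq_idx var_indices =>
      simp only [pvStepC]
      rw [if_neg hle]
      cases hc : cache.get? (pvCodes var_indices) with
      | none =>
        intro sig ps h
        rw [PySem.Dict.get?_insert] at h
        by_cases hsig : sig = pvCodes var_indices
        · rw [if_pos hsig] at h
          rw [hsig]
          exact (Option.some_inj.mp h).symm
        · rw [if_neg hsig] at h
          exact hinv sig ps h
      | some pats => simpa [hc] using hinv

theorem pvCache_elim : ∀ (l : List (List Int × Int))
    (st : PySem.Dict (List Int) Int × PySem.Dict (List Int) (List (List Int))),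
    pvCacheInv st.2 → (l.foldl pvStepC st).1 = l.foldl pvStepD st.1 := by
  intro l
  induction l with
  | nil => intro st _; rfl
  | cons kv t ih =>
    intro st hinv
    rw [List.foldl_cons, List.foldl_cons]
    rw [ih (pvStepC st kv) (pvStepC_snd_inv st kv hinv), pvStepC_fst st kv hinv]

theorem pvCacheInv_empty : pvCacheInv PySem.Dict.empty := by
  intro sig ps h
  rw [PySem.Dict.get?_empty] at h
  cases h

-- ===== VERDICT (by name: the statement is the Claim_ definition above) =====
theorem expand_symmetric_indices_spec : Claim_equal_expand_symmetric_indices := by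
  intro sparse_coo_dict _
  unfold Spec_expand_symmetric_indices
  rw [pvPortA_eq, pvPortB_eq,
    pvCache_elim sparse_coo_dict (PySem.Dict.empty, PySem.Dict.empty) pvCacheInv_empty,
    show pvStepD = pvStepB from funext fun e => funext fun kv => pvStepD_eq_B e kv,
    pvFold_eq sparse_coo_dict PySem.Dict.empty PySem.Dict.nodup_keys_empty]
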